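-- pv_equiv track=rewrite | github.com/rationality6/algo_memo | py/problems/hide_numbers.py | hide_numbers
-- ===== SOURCE A (Python) =====
-- def hide_numbers(s):
--     result = ''
--     alist = list(s)
--     for i in range(len(alist)):
--         if i > 6:
--             result += s[i]
--         else:
--             result += '*'
--     return result
-- ===== SOURCE B (Python) =====
-- def hide_numbers(s):
--     return '*' * min(7, len(s)) + s[7:]
-- ===== Notes on version B (the rewrite author's own statement) =====
-- stated objective: faster
-- what changed: Replaced the index-by-index loop with repeated string concatenation by a closed-form expression: an asterisk repeated min(7, len(s)) times followed by the tail slice from index 7.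
import Mathlib
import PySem

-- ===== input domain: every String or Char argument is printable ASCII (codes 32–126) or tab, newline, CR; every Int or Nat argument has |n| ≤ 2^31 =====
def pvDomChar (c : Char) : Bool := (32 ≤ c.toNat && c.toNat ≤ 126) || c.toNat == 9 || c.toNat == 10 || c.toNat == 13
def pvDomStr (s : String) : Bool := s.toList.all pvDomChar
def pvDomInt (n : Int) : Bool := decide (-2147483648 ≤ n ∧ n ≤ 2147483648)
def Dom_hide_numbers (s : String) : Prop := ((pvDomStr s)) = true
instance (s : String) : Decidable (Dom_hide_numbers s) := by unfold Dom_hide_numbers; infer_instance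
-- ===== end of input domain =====

-- B replaces A's per-index loop with a closed form: '*' * min(7, len(s)) + s[7:] (simpler).

-- ===== PORT A =====
def hide_numbers (s : String) : String :=
  let alist := s.toList
  String.ofList ((PySem.List.pyRange 0 alist.length 1).foldl
    (fun result i =>
      if i > 6 then result ++ [PySem.List.pyGetD s.toList i ' ']
      else result ++ ['*']) [])

-- ===== PORT B =====
def hide_numbers_alt (s : String) : String :=
  String.ofList (PySem.List.pyRepeat ['*'] (min 7 (s.toList.length : Int))
    ++ PySem.List.slice s.toList (some 7) none)

-- ===== PRECONDITION & SPEC =====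
def Spec_hide_numbers (s : String) (out : String) : Prop := out = hide_numbers_alt s
instance (s : String) (out : String) : Decidable (Spec_hide_numbers s out) := by unfold Spec_hide_numbers; infer_instance

-- ===== CLAIM (what is proved, stated in full; the proofs are below) =====
def Claim_equal_hide_numbers : Prop := ∀ (s : String), Dom_hide_numbers s → Spec_hide_numbers s (hide_numbers s)

-- ===== LEMMAS AND PROOFS =====

theorem hide_map_range (l : List Char) (n : Nat) (hn : n ≤ l.length) :
    (List.range n).map (fun k => if k > 6 then l.getD k ' ' else '*')
      = List.replicate (min 7 n) '*' ++ (l.take n).drop 7 := by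
  induction n with
  | zero => simp
  | succ m ih =>
    rw [List.range_succ, List.map_append, ih (by omega)]
    by_cases h7 : m > 6
    · have hm : m < l.length := by omega
      have htake : l.take (m + 1) = l.take m ++ [l[m]] := by
        rw [List.take_add_one]
        simp [List.getElem?_eq_getElem hm]
      have hmin : min 7 (m + 1) = min 7 m := by omega
      rw [htake, hmin, List.drop_append_of_le_length (by simp; omega)]
      simp [h7, List.getElem?_eq_getElem hm]
    · have hmin : min 7 (m + 1) = m + 1 := by omega
      have hmin' : min 7 m = m := by omega
      have hdrop : (l.take (m + 1)).drop 7 = [] := by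
        apply List.drop_eq_nil_of_le
        simp; omega
      have hdrop' : (l.take m).drop 7 = [] := by
        apply List.drop_eq_nil_of_le
        simp; omega
      rw [hmin, hmin', hdrop, hdrop']
      simp [h7, List.replicate_succ']

theorem hide_numbers_spec : Claim_equal_hide_numbers := by
  unfold Claim_equal_hide_numbers
  intro s _
  unfold Spec_hide_numbers hide_numbers hide_numbers_alt
  simp only [PySem.List.pyRange_zero_natCast, List.foldl_map]
  have hf : (fun (x : List Char) (y : Nat) =>
      if (y : Int) > 6 then x ++ [PySem.List.pyGetD s.toList (y : Int) ' '] else x ++ ['*'])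
      = fun (x : List Char) (y : Nat) => x ++ [if (y : Int) > 6 then PySem.List.pyGetD s.toList (y : Int) ' ' else '*'] := by
    funext x y; split <;> rfl
  rw [hf, PySem.List.foldl_append_singleton_eq_map, List.nil_append,
    PySem.List.slice_from s.toList (a := 7) (by norm_num)]
  congr 1
  have : (PySem.List.pyRepeat ['*'] (min 7 (s.toList.length : Int)))
      = List.replicate (min 7 s.toList.length) '*' := by
    rw [PySem.List.pyRepeat_singleton]
    congr 1
    omega
  rw [this]
  rw [show Int.toNat 7 = 7 from rfl]
  have := hide_map_range s.toList s.toList.length le_rfl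
  simp only [List.take_length] at this
  rw [← this]
  apply List.map_congr_left
  intro k hk
  simp only [List.mem_range] at hk
  simp only [PySem.List.pyGetD_natCast]
  by_cases h : k > 6
  · rw [if_pos (by exact_mod_cast h), if_pos h]
  · rw [if_neg (by exact_mod_cast h), if_neg h]
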